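-- pv_equiv track=rewrite | github.com/DPNT-Sourcecode/CHK-oxqo01 | lib/solutions/CHK/checkout_solution.py | discounted_offers
-- ===== SOURCE A (Python) =====
-- ITEMS = {"A": 50,
--          "B": 30,
--          "C": 20,
--          "D": 15,
--          "E": 40,
--          "F": 10,
--          "G": 20,
--          "H": 10,
--          "I": 35,
--          "J": 60,
--          "K": 80,
--          "L": 90,
--          "M": 15,
--          "N": 40,
--          "O": 10,
--          "P": 50,
--          "Q": 30,
--          "R": 50,
--          "S": 30,
--          "T": 20,
--          "U": 40,
--          "V": 50,
--          "W": 20,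
--          "X": 90,
--          "Y": 10,
--          "Z": 50
--          }
--
-- def has_offer(offers, k, v):
--     if k in offers:
--         for offer in offers[k]:
--             if v >= offer[0]:
--                 return True, offer
--     return False, None
--
-- def discounted_offers(items_map, offers):
--     checkout_sum = 0
--     for k, _ in items_map.items():
--         item_has_offer, offer = has_offer(offers, k, items_map[k])
--         while item_has_offer:
--             offer_number = items_map[k] // offer[0]
--             checkout_sum += (offer[1] * offer_number)
--             items_map[k] -= offer[0] * offer_number
--             item_has_offer, offer = has_offer(offers, k, items_map[k])
--
--     for k, v in items_map.items():
--         if k in ITEMS and v > 0: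
--             checkout_sum += ITEMS[k] * v
--     return checkout_sum
-- ===== SOURCE B (Python) =====
-- ITEMS = {"A": 50, "B": 30, "C": 20, "D": 15, "E": 40, "F": 10, "G": 20,
--          "H": 10, "I": 35, "J": 60, "K": 80, "L": 90, "M": 15, "N": 40,
--          "O": 10, "P": 50, "Q": 30, "R": 50, "S": 30, "T": 20, "U": 40,
--          "V": 50, "W": 20, "X": 90, "Y": 10, "Z": 50
--          }
--
-- def discounted_offers(items_map, offers):
--     # One pass: each key's offer tiers are applied in order with a single
--     # floor division per tier, then the per-unit price covers the remainder.
--     total = 0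
--     for k, v in items_map.items():
--         for threshold, price in offers.get(k, []):
--             if v >= threshold:
--                 count = v // threshold
--                 total += price * count
--                 v -= threshold * count
--         items_map[k] = v
--         if k in ITEMS and v > 0:
--             total += ITEMS[k] * v
--     return total
-- ===== Notes on version B (the rewrite author's own statement) =====
-- stated objective: simpler
-- what changed: B replaces A's has_offer rescanning, the per-key while loop and the separate second pricing pass with a single in-order pass: for each item it walks its offer tiers once, taking each tier's full multiple with one floor division, then immediately adds the per-unit price for the remainder.
import Mathlib
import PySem

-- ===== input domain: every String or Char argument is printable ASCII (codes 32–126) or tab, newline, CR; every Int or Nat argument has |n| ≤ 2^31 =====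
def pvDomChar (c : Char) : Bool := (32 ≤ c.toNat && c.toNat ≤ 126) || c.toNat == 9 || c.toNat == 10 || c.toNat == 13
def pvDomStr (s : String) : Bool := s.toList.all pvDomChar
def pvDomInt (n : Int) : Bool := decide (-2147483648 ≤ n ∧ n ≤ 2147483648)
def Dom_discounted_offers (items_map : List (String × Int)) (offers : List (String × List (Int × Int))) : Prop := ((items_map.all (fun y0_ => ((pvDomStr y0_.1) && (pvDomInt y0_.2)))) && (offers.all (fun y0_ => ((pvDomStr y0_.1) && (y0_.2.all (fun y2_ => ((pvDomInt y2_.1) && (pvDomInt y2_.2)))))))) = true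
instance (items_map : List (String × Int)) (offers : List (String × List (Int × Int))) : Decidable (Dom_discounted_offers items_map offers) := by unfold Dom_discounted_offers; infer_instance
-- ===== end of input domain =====

-- B collapses A's while/has_offer rescanning and its second pricing pass into one in-order
-- pass over the items (objective: simpler). Both Pythons mutate items_map to the same
-- remainders; the equivalence proved here is about the return value only.

-- ===== PORT A =====
def pvITEMS : PySem.Dict String Int := PySem.Dict.mk
  [("A", 50), ("B", 30), ("C", 20), ("D", 15), ("E", 40), ("F", 10), ("G", 20),
   ("H", 10), ("I", 35), ("J", 60), ("K", 80), ("L", 90), ("M", 15), ("N", 40),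
   ("O", 10), ("P", 50), ("Q", 30), ("R", 50), ("S", 30), ("T", 20), ("U", 40),
   ("V", 50), ("W", 20), ("X", 90), ("Y", 10), ("Z", 50)]

-- 'for offer in offers[k]: if v >= offer[0]: return True, offer' (first matching tier)
def has_offer_find : List (Int × Int) → Int → Option (Int × Int)
  | [], _ => none
  | o :: rest, v => if v ≥ o.1 then some o else has_offer_find rest v

-- has_offer(offers, k, v); (False, None) is modelled as none, (True, offer) as some offer
def has_offer (offers : PySem.Dict String (List (Int × Int))) (k : String) (v : Int) :
    Option (Int × Int) :=
  match offers.get? k with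
  | some tiers => has_offer_find tiers v
  | none => none

-- A's 'while item_has_offer: …' on the dict entry of key k; the fuel argument only makes
-- the recursion total (under Pre_ the loop always stops before the fuel does)
def whileOffer (offers : PySem.Dict String (List (Int × Int))) (k : String) :
    Nat → Int → PySem.Dict String Int → Int × PySem.Dict String Int
  | 0, s, d => (s, d)
  | fuel + 1, s, d =>
    match has_offer offers k (d.getD k 0) with
    | none => (s, d)
    | some offer =>
      let n := PySem.Int.floordiv (d.getD k 0) offer.1
      whileOffer offers k fuel (s + offer.2 * n) (d.insert k (d.getD k 0 - offer.1 * n))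

def discounted_offers (items_map : List (String × Int)) (offers : List (String × List (Int × Int))) : Int :=
  let d0 := PySem.Dict.mk items_map
  let od := PySem.Dict.mk offers
  let sd := d0.keys.foldl
    (fun acc k => whileOffer od k ((acc.2.getD k 0).toNat + 1) acc.1 acc.2) ((0 : Int), d0)
  sd.2.items.foldl
    (fun (s : Int) (kv : String × Int) =>
      match pvITEMS.get? kv.1 with
      | some price => if kv.2 > 0 then s + price * kv.2 else s
      | none => s)
    sd.1

-- ===== PORT B =====
-- 'for threshold, price in offers.get(k, []): if v >= threshold: …' over the tiers in order
def applyTiers (tiers : List (Int × Int)) (acc : Int × Int) : Int × Int :=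
  tiers.foldl
    (fun acc o =>
      if acc.2 ≥ o.1 then
        let n := PySem.Int.floordiv acc.2 o.1
        (acc.1 + o.2 * n, acc.2 - o.1 * n)
      else acc)
    acc

def discounted_offers_alt (items_map : List (String × Int)) (offers : List (String × List (Int × Int))) : Int :=
  let od := PySem.Dict.mk offers
  items_map.foldl
    (fun total kv =>
      let gv := applyTiers (od.getD kv.1 []) (0, kv.2)
      let total := total + gv.1
      match pvITEMS.get? kv.1 with
      | some price => if gv.2 > 0 then total + price * gv.2 else total
      | none => total)
    0

-- ===== PRECONDITION & SPEC =====
-- Pre_ excludes exactly the inputs on which A does not return: an item whose offer list has a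
-- tier with threshold ≤ 0 not exceeding the item's count makes A raise ZeroDivisionError
-- (threshold 0) or loop forever (negative threshold). It also requires distinct item keys,
-- which every real Python dict argument has (the assoc-list encoding of a dict cannot
-- duplicate keys).
def Pre_discounted_offers (items_map : List (String × Int)) (offers : List (String × List (Int × Int))) : Prop :=
  (items_map.map Prod.fst).Nodup ∧
    ∀ kv ∈ items_map, ∀ o ∈ (PySem.Dict.mk offers).getD kv.1 [], 1 ≤ o.1 ∨ kv.2 < o.1
instance (items_map : List (String × Int)) (offers : List (String × List (Int × Int))) : Decidable (Pre_discounted_offers items_map offers) := by unfold Pre_discounted_offers; infer_instance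

def pvWitness_discounted_offers : (List (String × Int)) × (List (String × List (Int × Int))) :=
  ([("A", 8), ("B", 2)], [("A", [(5, 200), (3, 130)])])

def Spec_discounted_offers (items_map : List (String × Int)) (offers : List (String × List (Int × Int))) (out : Int) : Prop := out = discounted_offers_alt items_map offers
instance (items_map : List (String × Int)) (offers : List (String × List (Int × Int))) (out : Int) : Decidable (Spec_discounted_offers items_map offers out) := by unfold Spec_discounted_offers; infer_instance

-- ===== CLAIM (what is proved, stated in full; the proofs are below) =====
def Claim_equal_discounted_offers : Prop := ∀ (items_map : List (String × Int)) (offers : List (String × List (Int × Int))), Dom_discounted_offers items_map offers → Pre_discounted_offers items_map offers → Spec_discounted_offers items_map offers (discounted_offers items_map offers)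

-- ===== LEMMAS AND PROOFS =====

-- gain and remainder of B's in-order tier pass, started from sum 0
def pvGain (tiers : List (Int × Int)) (v : Int) : Int := (applyTiers tiers (0, v)).1
def pvRem (tiers : List (Int × Int)) (v : Int) : Int := (applyTiers tiers (0, v)).2

-- the per-unit price added by A's second pass / B's tail for a final entry (k, v)
def pvBase (k : String) (v : Int) : Int :=
  match pvITEMS.get? k with
  | some price => if v > 0 then price * v else 0
  | none => 0

theorem applyTiers_cons (o : Int × Int) (rest : List (Int × Int)) (a : Int × Int) :
    applyTiers (o :: rest) a
      = applyTiers rest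
          (if a.2 ≥ o.1 then
            (a.1 + o.2 * PySem.Int.floordiv a.2 o.1, a.2 - o.1 * PySem.Int.floordiv a.2 o.1)
          else a) := by
  by_cases h : a.2 ≥ o.1 <;> simp [applyTiers, h]

theorem applyTiers_shift (tiers : List (Int × Int)) (s v : Int) :
    applyTiers tiers (s, v) = (s + pvGain tiers v, pvRem tiers v) := by
  induction tiers generalizing s v with
  | nil => simp [applyTiers, pvGain, pvRem]
  | cons o rest ih =>
    simp only [pvGain, pvRem, applyTiers_cons]
    by_cases h : v ≥ o.1 <;> simp only [h, ite_true, ite_false] <;>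
      rw [ih, ih] <;> refine Prod.ext ?_ ?_ <;> simp <;> ring

theorem has_offer_find_none (tiers : List (Int × Int)) (v : Int)
    (h : has_offer_find tiers v = none) (s : Int) :
    applyTiers tiers (s, v) = (s, v) := by
  induction tiers generalizing s with
  | nil => simp [applyTiers]
  | cons o rest ih =>
    simp only [has_offer_find] at h
    by_cases hv : v ≥ o.1
    · simp [hv] at h
    · rw [applyTiers_cons]
      simp only [hv, ite_false] at *
      exact ih h s

theorem has_offer_find_some_mem (tiers : List (Int × Int)) (v : Int) (o : Int × Int)
    (h : has_offer_find tiers v = some o) : o ∈ tiers ∧ o.1 ≤ v := by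
  induction tiers with
  | nil => simp [has_offer_find] at h
  | cons x rest ih =>
    simp only [has_offer_find] at h
    by_cases hv : v ≥ x.1
    · simp only [hv, ite_true] at h
      cases h; exact ⟨List.mem_cons_self, hv⟩
    · simp only [hv, ite_false] at h
      obtain ⟨hm, hle⟩ := ih h
      exact ⟨List.mem_cons_of_mem _ hm, hle⟩

theorem applyTiers_step (tiers : List (Int × Int)) (v t p : Int)
    (h : has_offer_find tiers v = some (t, p))
    (hpos : ∀ o ∈ tiers, 1 ≤ o.1 ∨ v < o.1) (s : Int) :
    applyTiers tiers (s, v)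
      = applyTiers tiers (s + p * PySem.Int.floordiv v t, v - t * PySem.Int.floordiv v t) := by
  have htv : t ≤ v := (has_offer_find_some_mem _ _ _ h).2
  have ht : 1 ≤ t := by
    rcases hpos _ (has_offer_find_some_mem _ _ _ h).1 with h1 | h1
    · exact h1
    · omega
  have hmod : v - t * PySem.Int.floordiv v t = PySem.Int.mod v t := by
    have := PySem.Int.floordiv_mul_add_mod v t; linarith
  have h0 : 0 ≤ v - t * PySem.Int.floordiv v t := by
    rw [hmod]; exact PySem.Int.mod_nonneg _ (by omega)
  have hlt : v - t * PySem.Int.floordiv v t < t := by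
    rw [hmod]; exact PySem.Int.mod_lt _ (by omega)
  revert h hpos s
  induction tiers with
  | nil => intro h _ _; simp [has_offer_find] at h
  | cons x rest ih =>
    intro h hpos s
    simp only [has_offer_find] at h
    rw [applyTiers_cons, applyTiers_cons]
    by_cases hv : v ≥ x.1
    · simp only [hv, ite_true] at h ⊢
      cases h
      have hv2 : ¬ (v - t * PySem.Int.floordiv v t ≥ t) := by omega
      simp [hv2]
    · have hv2 : ¬ (v - t * PySem.Int.floordiv v t ≥ x.1) := by omega
      simp only [hv, hv2, ite_false] at h ⊢
      exact ih h (fun o ho => hpos o (List.mem_cons_of_mem _ ho)) s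

-- re-inserting the stored value is the identity on a dict with distinct keys
theorem insert_getD_self (d : PySem.Dict String Int) (k : String)
    (hnd : d.keys.Nodup) (hk : k ∈ d.keys) :
    d.insert k (d.getD k 0) = d := by
  have hc : d.contains k = true := (PySem.Dict.contains_iff_mem_keys d k).mpr hk
  apply PySem.Dict.ext
  rw [PySem.Dict.items_insert_of_contains _ _ hc]
  apply List.map_congr_left ?_ |>.trans (List.map_id _)
  intro p hp
  by_cases hpk : p.1 == k
  · simp only [hpk, ite_true, id]
    have hk1 : p.1 = k := by simpa using hpk
    have := PySem.Dict.getD_of_mem_items (d := d) (k := p.1) (v := p.2) (by simpa using hp) hnd (d0 := 0)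
    rw [← hk1, this]
  · simp [hpk, id]

-- A's while loop computes exactly B's in-order tier pass on the entry of k
theorem whileOffer_eq (od : PySem.Dict String (List (Int × Int))) (k : String) :
    ∀ (fuel : Nat) (v s : Int) (d : PySem.Dict String Int),
      (∀ o ∈ od.getD k [], 1 ≤ o.1 ∨ v < o.1) →
      d.getD k 0 = v → v.toNat + 1 ≤ fuel → d.keys.Nodup → k ∈ d.keys →
      whileOffer od k fuel s d
        = (s + pvGain (od.getD k []) v, d.insert k (pvRem (od.getD k []) v)) := by
  intro fuel
  induction fuel with
  | zero => intro v s d _ _ hf; omega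
  | succ fuel ih =>
    intro v s d hpos hv hf hnd hk
    rw [whileOffer, hv]
    rcases hg : od.get? k with _ | ts
    · have hts : od.getD k [] = [] := by rw [PySem.Dict.getD_eq_get?_getD, hg]; rfl
      have : has_offer od k v = none := by simp [has_offer, hg]
      rw [this, hts]
      have h0 : applyTiers [] (0, v) = (0, v) := rfl
      simp only [pvGain, pvRem, h0]
      have hdd := insert_getD_self d k hnd hk
      rw [hv] at hdd
      rw [hdd]; simp
    · have hts : od.getD k [] = ts := by rw [PySem.Dict.getD_eq_get?_getD, hg]; rfl
      rw [hts] at hpos ⊢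
      rcases hfind : has_offer_find ts v with _ | o
      · have : has_offer od k v = none := by simp [has_offer, hg, hfind]
        rw [this]
        have h0 : applyTiers ts (0, v) = (0, v) := has_offer_find_none ts v hfind 0
        simp only [pvGain, pvRem, h0]
        have hdd := insert_getD_self d k hnd hk
        rw [hv] at hdd
        rw [hdd]; simp
      · obtain ⟨t, p⟩ := o
        have : has_offer od k v = some (t, p) := by simp [has_offer, hg, hfind]
        rw [this]
        have htv : t ≤ v := (has_offer_find_some_mem _ _ _ hfind).2
        have ht : 1 ≤ t := by
          rcases hpos _ (has_offer_find_some_mem _ _ _ hfind).1 with h1 | h1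
          · exact h1
          · omega
        set n := PySem.Int.floordiv v t with hn
        have hmod : v - t * n = PySem.Int.mod v t := by
          have := PySem.Int.floordiv_mul_add_mod v t; rw [hn]; linarith
        have h0 : 0 ≤ v - t * n := by rw [hmod]; exact PySem.Int.mod_nonneg _ (by omega)
        have hlt : v - t * n < t := by rw [hmod]; exact PySem.Int.mod_lt _ (by omega)
        have hfuel : (v - t * n).toNat + 1 ≤ fuel := by omega
        have hpos' : ∀ o ∈ ts, 1 ≤ o.1 ∨ v - t * n < o.1 := by
          intro o ho
          rcases hpos o ho with h1 | h1
          · exact Or.inl h1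
          · exact Or.inr (by omega)
        have hstep := ih (v - t * n) (s + p * n) (d.insert k (v - t * n))
          (by rw [hts]; exact hpos') (PySem.Dict.getD_insert_self d k _ 0) hfuel
          (PySem.Dict.nodup_keys_insert d k _ hnd)
          ((PySem.Dict.mem_keys_insert d k k _).mpr (Or.inl rfl))
        rw [hts] at hstep
        have hsg := applyTiers_step ts v t p hfind hpos 0
        rw [applyTiers_shift ts (0 + p * n) (v - t * n)] at hsg
        have hg' : pvGain ts v = p * n + pvGain ts (v - t * n) := by
          have := congrArg Prod.fst hsg
          simpa [pvGain] using this
        have hr' : pvRem ts v = pvRem ts (v - t * n) := by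
          have := congrArg Prod.snd hsg
          simpa [pvRem] using this
        show whileOffer od k fuel (s + p * n) (d.insert k (v - t * n)) = _
        rw [hstep, PySem.Dict.insert_insert_self, hg', hr']
        exact Prod.ext (by ring) rfl

theorem get?_mk_append_right (xs ys : List (String × Int)) (k : String)
    (h : k ∉ xs.map Prod.fst) :
    (PySem.Dict.mk (xs ++ ys)).get? k = (PySem.Dict.mk ys).get? k := by
  induction xs with
  | nil => simp
  | cons x rest ih =>
    simp only [List.map_cons, List.mem_cons, not_or] at h
    rw [List.cons_append, PySem.Dict.get?_mk_cons]
    have : ¬ (x.1 == k) := by simpa using fun e => h.1 e.symm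
    simp only [this]
    exact ih h.2

theorem insert_mk_append (xs ys : List (String × Int)) (k : String) (v w : Int)
    (hx : k ∉ xs.map Prod.fst) (hy : k ∉ ys.map Prod.fst) :
    (PySem.Dict.mk (xs ++ (k, v) :: ys)).insert k w = PySem.Dict.mk (xs ++ (k, w) :: ys) := by
  have hc : (PySem.Dict.mk (xs ++ (k, v) :: ys)).contains k = true := by
    rw [PySem.Dict.contains_iff_mem_keys]
    simp [PySem.Dict.keys]
  apply PySem.Dict.ext
  rw [PySem.Dict.items_insert_of_contains _ _ hc]
  show (xs ++ (k, v) :: ys).map _ = _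
  rw [List.map_append, List.map_cons]
  congr 1
  · apply List.map_congr_left ?_ |>.trans (List.map_id _)
    intro p hp
    have : ¬ (p.1 == k) := by
      simp only [beq_iff_eq]
      intro e; exact hx (e ▸ List.mem_map_of_mem hp)
    simp [this, id]
  · congr 1
    · simp
    · apply List.map_congr_left ?_ |>.trans (List.map_id _)
      intro p hp
      have : ¬ (p.1 == k) := by
        simp only [beq_iff_eq]
        intro e; exact hy (e ▸ List.mem_map_of_mem hp)
      simp [this, id]

theorem foldl_keys_eq (od : PySem.Dict String (List (Int × Int))) :
    ∀ (l pre : List (String × Int)) (s : Int),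
      (∀ kv ∈ l, ∀ o ∈ od.getD kv.1 [], 1 ≤ o.1 ∨ kv.2 < o.1) →
      ((pre ++ l).map Prod.fst).Nodup →
      (l.map Prod.fst).foldl
          (fun acc k => whileOffer od k ((acc.2.getD k 0).toNat + 1) acc.1 acc.2)
          (s, PySem.Dict.mk (pre ++ l))
        = (s + (l.map (fun p => pvGain (od.getD p.1 []) p.2)).sum,
           PySem.Dict.mk (pre ++ l.map (fun p => (p.1, pvRem (od.getD p.1 []) p.2)))) := by
  intro l
  induction l with
  | nil => intro pre s _ _; simp
  | cons kv rest ih =>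
    intro pre s hpos hnd
    obtain ⟨k, v⟩ := kv
    have hnd' : (pre.map Prod.fst ++ k :: rest.map Prod.fst).Nodup := by simpa using hnd
    have h1 := List.nodup_append.mp hnd'
    have hkrest : k ∉ rest.map Prod.fst := by
      have := h1.2.1; simp only [List.nodup_cons] at this; exact this.1
    have hkpre : k ∉ pre.map Prod.fst := fun hm => h1.2.2 k hm k (by simp) rfl
    have hget : (PySem.Dict.mk (pre ++ (k, v) :: rest)).getD k 0 = v := by
      rw [PySem.Dict.getD_eq_get?_getD, get?_mk_append_right _ _ _ hkpre, PySem.Dict.get?_mk_cons]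
      simp
    have hnodk : (PySem.Dict.mk (pre ++ (k, v) :: rest)).keys.Nodup := by
      rw [PySem.Dict.keys_mk]; simpa using hnd
    have hkmem : k ∈ (PySem.Dict.mk (pre ++ (k, v) :: rest)).keys := by
      rw [PySem.Dict.keys_mk]; simp
    have hW := whileOffer_eq od k (v.toNat + 1) v s _ (hpos (k, v) (by simp)) hget
      (le_refl _) hnodk hkmem
    rw [List.map_cons, List.foldl_cons]
    show (rest.map Prod.fst).foldl _
        (whileOffer od k (((PySem.Dict.mk (pre ++ (k, v) :: rest)).getD k 0).toNat + 1) s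
          (PySem.Dict.mk (pre ++ (k, v) :: rest))) = _
    rw [hget, hW, insert_mk_append _ _ _ _ _ hkpre hkrest]
    rw [show pre ++ (k, pvRem (od.getD k []) v) :: rest
          = (pre ++ [(k, pvRem (od.getD k []) v)]) ++ rest from by simp]
    rw [ih (pre ++ [(k, pvRem (od.getD k []) v)]) (s + pvGain (od.getD k []) v)
        (fun kv hm => hpos kv (List.mem_cons_of_mem _ hm)) (by simpa using hnd')]
    refine Prod.ext ?_ ?_
    · simp; ring
    · simp

theorem foldl_base (L : List (String × Int)) (c : Int) :
    L.foldl
        (fun (s : Int) (kv : String × Int) =>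
          match pvITEMS.get? kv.1 with
          | some price => if kv.2 > 0 then s + price * kv.2 else s
          | none => s)
        c
      = c + (L.map (fun kv => pvBase kv.1 kv.2)).sum := by
  induction L generalizing c with
  | nil => simp
  | cons kv rest ih =>
    rw [List.foldl_cons, ih, List.map_cons, List.sum_cons]
    have hb : (match pvITEMS.get? kv.1 with
            | some price => if kv.2 > 0 then c + price * kv.2 else c
            | none => c) = c + pvBase kv.1 kv.2 := by
      unfold pvBase
      rcases pvITEMS.get? kv.1 with _ | price
      · simp
      · by_cases h : kv.2 > 0 <;> simp [h]
    rw [hb]; ring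

theorem foldl_alt (od : PySem.Dict String (List (Int × Int))) (L : List (String × Int)) (c : Int) :
    L.foldl
        (fun (total : Int) (kv : String × Int) =>
          let gv := applyTiers (od.getD kv.1 []) (0, kv.2)
          let total := total + gv.1
          match pvITEMS.get? kv.1 with
          | some price => if gv.2 > 0 then total + price * gv.2 else total
          | none => total)
        c
      = c + (L.map (fun kv =>
          pvGain (od.getD kv.1 []) kv.2 + pvBase kv.1 (pvRem (od.getD kv.1 []) kv.2))).sum := by
  induction L generalizing c with
  | nil => simp
  | cons kv rest ih =>
    rw [List.foldl_cons, ih, List.map_cons, List.sum_cons]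
    have hb : (match pvITEMS.get? kv.1 with
            | some price =>
                if (applyTiers (od.getD kv.1 []) (0, kv.2)).2 > 0 then
                  c + (applyTiers (od.getD kv.1 []) (0, kv.2)).1
                    + price * (applyTiers (od.getD kv.1 []) (0, kv.2)).2
                else c + (applyTiers (od.getD kv.1 []) (0, kv.2)).1
            | none => c + (applyTiers (od.getD kv.1 []) (0, kv.2)).1)
          = c + (pvGain (od.getD kv.1 []) kv.2 + pvBase kv.1 (pvRem (od.getD kv.1 []) kv.2)) := by
      unfold pvBase pvGain pvRem
      rcases pvITEMS.get? kv.1 with _ | price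
      · simp
      · by_cases h : (applyTiers (od.getD kv.1 []) (0, kv.2)).2 > 0 <;> simp [h] <;> try ring
    rw [hb]; ring

-- ===== VERDICT (by name: the statement is the Claim_ definition above) =====
theorem discounted_offers_spec : Claim_equal_discounted_offers := by
  intro items offers _ hpre
  obtain ⟨hnd, hpos⟩ := hpre
  unfold Spec_discounted_offers
  simp only [discounted_offers, discounted_offers_alt]
  have hK := foldl_keys_eq (PySem.Dict.mk offers) items [] 0 hpos (by simpa using hnd)
  rw [List.nil_append] at hK
  have hkeys : (PySem.Dict.mk items).keys = items.map Prod.fst := by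
    rw [PySem.Dict.keys_mk]
  rw [hkeys, hK]
  rw [foldl_base, foldl_alt]
  simp only [List.nil_append, List.map_map, Function.comp_def]
  rw [PySem.List.sum_map_add_int]
  ring
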